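-- pv_equiv track=rewrite | github.com/Sivaram-S/Daily_Codes | DAY4_Stripe.py | find
-- ===== SOURCE A (Python) =====
-- def find(list_input):
--     for i in list_input:
--         if i < 0:
--             list_input[list_input.index(i)] = 0
--
--     start_value = min(list_input)
--     end_value = max(list_input)
--
--     x = [i for i in range(start_value+1, end_value)]
--
--     not_in = []
--
--     is_in_list = lambda k: True if k in list_input else False
--
--     for i in x:
--         if not is_in_list(i):
--             not_in.append(i)
--
--     if not_in:
--         return min(not_in)
--     else:
--         return max(list_input) + 1
-- ===== SOURCE B (Python) =====
-- def find(list_input):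
--     # same in-place mutation as the original: negatives become 0
--     list_input[:] = [0 if v < 0 else v for v in list_input]
--     s = sorted(set(list_input))
--     prev = s[0]
--     for v in s[1:]:
--         if v > prev + 1:
--             return prev + 1
--         prev = v
--     return prev + 1
-- ===== Notes on version B (the rewrite author's own statement) =====
-- stated objective: faster
-- what changed: Replaces the scan of every integer in (min,max) with a membership test per value by sorting the distinct clamped values once and returning prev+1 at the first gap between consecutive sorted values, max+1 if none.
-- outside the precondition, e.g. on find([]): A raises ValueError, B raises IndexError
import Mathlib
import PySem

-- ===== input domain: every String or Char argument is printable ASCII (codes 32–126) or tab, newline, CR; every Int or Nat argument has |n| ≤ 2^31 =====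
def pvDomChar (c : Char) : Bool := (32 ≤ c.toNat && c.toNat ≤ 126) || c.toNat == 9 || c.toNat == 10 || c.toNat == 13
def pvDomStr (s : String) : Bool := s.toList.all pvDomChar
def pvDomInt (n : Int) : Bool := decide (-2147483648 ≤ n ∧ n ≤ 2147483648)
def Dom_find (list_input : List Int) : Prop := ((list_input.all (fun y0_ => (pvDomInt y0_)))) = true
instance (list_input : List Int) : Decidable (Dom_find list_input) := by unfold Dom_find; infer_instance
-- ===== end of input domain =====

-- B sorts the distinct clamped values once and returns at the first gap between consecutive
-- sorted values, instead of A's membership scan over every integer of the open range (min,max).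
-- Both A and B mutate list_input in place (negatives become 0); the equivalence proved here is
-- about the return value.

-- ===== PORT A =====
-- the 'for i in list_input: if i < 0: list_input[list_input.index(i)] = 0' loop
-- (iteration by position over the list being mutated; list length never changes)
def findNegLoop (xs : List Int) (p : Nat) : List Int :=
  if h : p < xs.length then
    findNegLoop (if xs[p] < 0 then xs.set ((PySem.List.index? xs xs[p]).getD 0) 0 else xs) (p + 1)
  else xs
termination_by xs.length - p
decreasing_by
  all_goals split
  · simp only [List.length_set]; omega
  · omega

def find (list_input : List Int) : Int :=
  let l := findNegLoop list_input 0
  let start_value := (PySem.List.min? l (fun x => x)).getD 0   -- min([]) raises: excluded by Pre_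
  let end_value := (PySem.List.max? l (fun x => x)).getD 0
  let x := PySem.List.pyRange (start_value + 1) end_value 1
  let not_in := x.foldl (fun acc i => if ¬ (i ∈ l) then acc ++ [i] else acc) []
  if not_in ≠ [] then (PySem.List.min? not_in (fun x => x)).getD 0
  else (PySem.List.max? l (fun x => x)).getD 0 + 1

-- ===== PORT B =====
-- the 'for v in s[1:]' loop with its early return
def findGapWalk (prev : Int) : List Int → Int
  | [] => prev + 1
  | v :: t => if v > prev + 1 then prev + 1 else findGapWalk v t

def find_alt (list_input : List Int) : Int :=
  let c := list_input.map (fun v => if v < 0 then 0 else v)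
  let s := PySem.List.sorted (PySem.Set.ofList c) (fun x => x) false
  findGapWalk (PySem.List.pyGetD s 0 0) (PySem.List.slice s (some 1) none)   -- s[0] raises on []: excluded by Pre_

-- ===== PRECONDITION & SPEC =====
-- A raises ValueError (min of empty sequence) on [], B raises IndexError there; [] is excluded.
def Pre_find (list_input : List Int) : Prop := list_input ≠ []
instance (list_input : List Int) : Decidable (Pre_find list_input) := by unfold Pre_find; infer_instance

def pvWitness_find : List Int := [3, -1, 7, 3]

def Spec_find (list_input : List Int) (out : Int) : Prop := out = find_alt list_input
instance (list_input : List Int) (out : Int) : Decidable (Spec_find list_input out) := by unfold Spec_find; infer_instance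

-- ===== CLAIM (what is proved, stated in full; the proofs are below) =====
def Claim_equal_find : Prop := ∀ (list_input : List Int), Dom_find list_input → Pre_find list_input → Spec_find list_input (find list_input)

-- ===== LEMMAS AND PROOFS =====

-- both results are "the unique r with min < r, r ∉ c and every value strictly between present"
def IsFirstMissing (c : List Int) (m r : Int) : Prop :=
  m < r ∧ r ∉ c ∧ ∀ k, m < k → k < r → k ∈ c

theorem isFirstMissing_unique {c : List Int} {m r₁ r₂ : Int}
    (h₁ : IsFirstMissing c m r₁) (h₂ : IsFirstMissing c m r₂) : r₁ = r₂ := by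
  obtain ⟨hm₁, hn₁, ha₁⟩ := h₁
  obtain ⟨hm₂, hn₂, ha₂⟩ := h₂
  rcases lt_trichotomy r₁ r₂ with h | h | h
  · exact absurd (ha₂ r₁ hm₁ h) hn₁
  · exact h
  · exact absurd (ha₁ r₂ hm₂ h) hn₂

theorem index?_append_cons_not_mem {pre t : List Int} {v : Int} (hv : v ∉ pre) :
    PySem.List.index? (pre ++ v :: t) v = some pre.length := by
  induction pre with
  | nil => simpa using PySem.List.index?_cons_self v t
  | cons a pre ih =>
    have ha : a ≠ v := by simp at hv; exact fun h => hv.1 h.symm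
    rw [List.cons_append, PySem.List.index?_cons_of_ne _ ha,
      ih (by simp at hv; exact hv.2)]
    rfl

theorem findNegLoop_eq_map (post pre : List Int) (hpre : ∀ y ∈ pre, 0 ≤ y) :
    findNegLoop (pre ++ post) pre.length = pre ++ post.map (fun v => if v < 0 then 0 else v) := by
  induction post generalizing pre with
  | nil => rw [findNegLoop]; simp
  | cons v t ih =>
    rw [findNegLoop]
    have hlen : pre.length < (pre ++ v :: t).length := by simp
    rw [dif_pos hlen]
    have hget : (pre ++ v :: t)[pre.length] = v := by
      rw [List.getElem_append_right (Nat.le_refl _)]; simp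
    rw [hget]
    by_cases hv : v < 0
    · have hvnp : v ∉ pre := fun hmem => absurd (hpre v hmem) (by omega)
      rw [if_pos hv, index?_append_cons_not_mem hvnp]
      have hset : (pre ++ v :: t).set pre.length 0 = (pre ++ [0]) ++ t := by
        rw [List.set_append_right _ _ (Nat.le_refl _)]
        simp
      simp only [Option.getD_some, hset]
      have hpre0 : ∀ y ∈ pre ++ [0], 0 ≤ y := by
        intro y hy
        rcases List.mem_append.1 hy with h | h
        · exact hpre y h
        · simp at h; omega
      calc findNegLoop (pre ++ [0] ++ t) (pre.length + 1)
          = findNegLoop (pre ++ [0] ++ t) (pre ++ [0]).length := by simp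
        _ = (pre ++ [0]) ++ t.map (fun v => if v < 0 then 0 else v) := ih (pre ++ [0]) hpre0
        _ = pre ++ (v :: t).map (fun v => if v < 0 then 0 else v) := by simp [hv]
    · rw [if_neg hv]
      have hprev : ∀ y ∈ pre ++ [v], 0 ≤ y := by
        intro y hy
        rcases List.mem_append.1 hy with h | h
        · exact hpre y h
        · simp at h; omega
      calc findNegLoop (pre ++ v :: t) (pre.length + 1)
          = findNegLoop ((pre ++ [v]) ++ t) (pre ++ [v]).length := by simp
        _ = (pre ++ [v]) ++ t.map (fun v => if v < 0 then 0 else v) := ih (pre ++ [v]) hprev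
        _ = pre ++ (v :: t).map (fun v => if v < 0 then 0 else v) := by simp [hv]

theorem findNegLoop_zero (xs : List Int) :
    findNegLoop xs 0 = xs.map (fun v => if v < 0 then 0 else v) := by
  simpa using findNegLoop_eq_map xs [] (by simp)

-- A's value is the first missing value above min
theorem find_isFirstMissing (xs : List Int) (hxs : xs ≠ []) :
    IsFirstMissing (xs.map (fun v => if v < 0 then 0 else v))
      ((PySem.List.min? (xs.map (fun v => if v < 0 then 0 else v)) (fun x => x)).getD 0)
      (find xs) := by
  unfold find
  rw [findNegLoop_zero]
  set c := xs.map (fun v => if v < 0 then 0 else v) with hc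
  have hcne : c ≠ [] := by simpa [hc] using hxs
  obtain ⟨m, hm⟩ : ∃ m, PySem.List.min? c (fun x => x) = some m := by
    rcases h : PySem.List.min? c (fun x => x) with _ | m
    · exact absurd ((PySem.List.min?_eq_none_iff _ _).1 h) hcne
    · exact ⟨m, rfl⟩
  obtain ⟨M, hM⟩ : ∃ M, PySem.List.max? c (fun x => x) = some M := by
    rcases h : PySem.List.max? c (fun x => x) with _ | M
    · exact absurd ((PySem.List.max?_eq_none_iff _ _).1 h) hcne
    · exact ⟨M, rfl⟩
  have hmmem := PySem.List.min?_mem hm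
  have hmmin := PySem.List.min?_isMin hm
  have hMmem := PySem.List.max?_mem hM
  have hMmax := PySem.List.max?_isMax hM
  simp only [hm, hM, Option.getD_some]
  have hfold : ∀ (l init : List Int),
      l.foldl (fun acc i => if ¬ (i ∈ c) then acc ++ [i] else acc) init
        = init ++ l.filter (fun i => !decide (i ∈ c)) := by
    intro l
    induction l with
    | nil => simp
    | cons a l ihl =>
      intro init
      rw [List.foldl_cons, ihl, List.filter_cons]
      by_cases ha : a ∈ c <;> simp [ha]
  rw [hfold]
  rw [List.nil_append]
  set notIn := (PySem.List.pyRange (m + 1) M 1).filter (fun i => !decide (i ∈ c)) with hni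
  have hmem_notIn : ∀ k, k ∈ notIn ↔ (m + 1 ≤ k ∧ k < M) ∧ k ∉ c := by
    intro k
    simp [hni, List.mem_filter, PySem.List.mem_pyRange_one]
  by_cases hempty : notIn = ([] : List Int)
  · rw [if_neg (by simp [hempty])]
    refine ⟨by have h0 : m ≤ M := hmmin M hMmem; omega, ?_, ?_⟩
    · intro hmem
      have h0 : M + 1 ≤ M := hMmax _ hmem; omega
    · intro k hk1 hk2
      by_cases hkM : k = M
      · exact hkM ▸ hMmem
      · by_contra hkc
        have : k ∈ notIn := (hmem_notIn k).2 ⟨⟨by omega, by omega⟩, hkc⟩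
        simp [hempty] at this
  · rw [if_pos hempty]
    obtain ⟨r, hr⟩ : ∃ r, PySem.List.min? notIn (fun x => x) = some r := by
      rcases h : PySem.List.min? notIn (fun x => x) with _ | r
      · exact absurd ((PySem.List.min?_eq_none_iff _ _).1 h) hempty
      · exact ⟨r, rfl⟩
    have hrmem := (hmem_notIn r).1 (PySem.List.min?_mem hr)
    have hrmin := PySem.List.min?_isMin hr
    simp only [hr, Option.getD_some]
    refine ⟨by omega, hrmem.2, ?_⟩
    intro k hk1 hk2
    by_contra hkc
    have hkni : k ∈ notIn := (hmem_notIn k).2 ⟨⟨by omega, by omega⟩, hkc⟩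
    have h0 : r ≤ k := hrmin k hkni
    omega

-- the gap walk on a strictly increasing list finds the first value missing from it
theorem findGapWalk_isFirstMissing (t : List Int) (prev : Int)
    (hp : (prev :: t).Pairwise (· < ·)) :
    IsFirstMissing (prev :: t) prev (findGapWalk prev t) := by
  induction t generalizing prev with
  | nil =>
    refine ⟨by simp [findGapWalk], by simp [findGapWalk], ?_⟩
    intro k h1 h2; simp [findGapWalk] at h2 ⊢; omega
  | cons v t ih =>
    have hpv : prev < v := (List.pairwise_cons.1 hp).1 v (by simp)
    have hp' : (v :: t).Pairwise (· < ·) := (List.pairwise_cons.1 hp).2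
    by_cases hgap : v > prev + 1
    · have hres : findGapWalk prev (v :: t) = prev + 1 := by simp [findGapWalk, hgap]
      rw [hres]
      refine ⟨by omega, ?_, by intro k h1 h2; omega⟩
      intro hmem
      rcases List.mem_cons.1 hmem with h | hmem
      · omega
      · rcases List.mem_cons.1 hmem with h | hmem
        · omega
        · have := (List.pairwise_cons.1 hp').1 _ hmem
          omega
    · have hv : v = prev + 1 := by omega
      have hres : findGapWalk prev (v :: t) = findGapWalk v t := by
        simp [findGapWalk, hgap]
      rw [hres]
      obtain ⟨h1, h2, h3⟩ := ih v hp'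
      refine ⟨by omega, ?_, ?_⟩
      · intro hmem
        rcases List.mem_cons.1 hmem with h | hmem
        · omega
        · exact h2 hmem
      · intro k hk1 hk2
        by_cases hkv : k ≤ v
        · have : k = v := by omega
          simp [this]
        · exact List.mem_cons_of_mem _ (h3 k (by omega) hk2)

-- B's value is the first missing value above min
theorem find_alt_isFirstMissing (xs : List Int) (hxs : xs ≠ []) :
    IsFirstMissing (xs.map (fun v => if v < 0 then 0 else v))
      ((PySem.List.min? (xs.map (fun v => if v < 0 then 0 else v)) (fun x => x)).getD 0)
      (find_alt xs) := by
  unfold find_alt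
  set c := xs.map (fun v => if v < 0 then 0 else v) with hc
  have hcne : c ≠ [] := by simpa [hc] using hxs
  obtain ⟨m, hm⟩ : ∃ m, PySem.List.min? c (fun x => x) = some m := by
    rcases h : PySem.List.min? c (fun x => x) with _ | m
    · exact absurd ((PySem.List.min?_eq_none_iff _ _).1 h) hcne
    · exact ⟨m, rfl⟩
  have hmmem := PySem.List.min?_mem hm
  have hmmin := PySem.List.min?_isMin hm
  simp only [hm, Option.getD_some]
  set s := PySem.List.sorted (PySem.Set.ofList c) (fun x => x) false with hs
  have hmem_s : ∀ x, x ∈ s ↔ x ∈ c := by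
    intro x
    rw [hs, PySem.List.mem_sorted, PySem.Set.mem_ofList]
  have hpair : s.Pairwise (· < ·) := by
    rw [hs]; exact PySem.List.sorted_ofList_pairwise_lt c
  obtain ⟨h, t, hst⟩ : ∃ h t, s = h :: t := by
    rcases hcase : s with _ | ⟨h, t⟩
    · exact absurd ((hmem_s m).2 hmmem) (by simp [hcase])
    · exact ⟨h, t, rfl⟩
  have hhm : h = m := by
    have hhc : h ∈ c := (hmem_s h).1 (by simp [hst])
    have hmh : h ≤ m := by
      have hms : m ∈ s := (hmem_s m).2 hmmem
      rw [hst] at hms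
      rcases List.mem_cons.1 hms with he | hmem
      · omega
      · have := (List.pairwise_cons.1 (hst ▸ hpair)).1 m hmem
        omega
    have h0 : m ≤ h := hmmin h hhc
    omega
  rw [hst, PySem.List.pyGetD_zero_cons, PySem.List.slice_from_one]
  simp only [List.tail_cons]
  obtain ⟨h1, h2, h3⟩ := findGapWalk_isFirstMissing t h (hst ▸ hpair)
  refine ⟨hhm ▸ h1, ?_, ?_⟩
  · intro hmem
    exact h2 (hst ▸ (hmem_s _).2 hmem)
  · intro k hk1 hk2
    exact (hmem_s k).1 (hst ▸ h3 k (by omega) hk2)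

-- ===== VERDICT (by name: the statement is the Claim_ definition above) =====
theorem find_spec : Claim_equal_find := by
  intro xs _ hpre
  unfold Spec_find
  exact isFirstMissing_unique (find_isFirstMissing xs hpre) (find_alt_isFirstMissing xs hpre)
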